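-- pv_equiv track=rewrite | github.com/Ken104-web/codewars-challenges | codilty2/solution.py | countSame
-- ===== SOURCE A (Python) =====
-- def countSame(s):
--     count = 0
--     N=len(s)
--
--     for i in range(N):
--         # check if the two elements are the same
--         if s[0] == s[-1]:
--             count += 1
--             # planning of using slice method to remove the first element through slicing the second to the end
--         s = s[1:] + s[0]
--     return count
-- ===== SOURCE B (Python) =====
-- def countSame(s):
--     # one linear pass: count adjacent equal pairs, plus the cyclic wrap pair
--     if not s:
--         return 0
--     count = sum(1 for a, b in zip(s, s[1:]) if a == b)
--     return count + (1 if s[0] == s[-1] else 0)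
-- ===== Notes on version B (the rewrite author's own statement) =====
-- stated objective: faster
-- what changed: Replaces the per-iteration string rotation (rebuilding the whole string N times and comparing first/last) with a single zip pass counting adjacent equal pairs plus a closed-form +1 for the cyclic wrap pair.
import Mathlib
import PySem

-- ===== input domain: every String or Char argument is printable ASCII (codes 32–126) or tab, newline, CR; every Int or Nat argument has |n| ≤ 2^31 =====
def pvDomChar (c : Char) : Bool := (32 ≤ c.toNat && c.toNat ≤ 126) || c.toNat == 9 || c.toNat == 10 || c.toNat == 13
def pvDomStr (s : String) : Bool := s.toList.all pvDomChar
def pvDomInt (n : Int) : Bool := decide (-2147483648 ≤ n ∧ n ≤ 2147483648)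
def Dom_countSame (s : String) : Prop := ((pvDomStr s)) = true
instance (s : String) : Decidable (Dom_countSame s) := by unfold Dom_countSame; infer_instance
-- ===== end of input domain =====

-- B replaces A's O(n^2) rotate-and-compare loop with a single zip pass counting adjacent
-- equal pairs plus a closed-form +1 for the cyclic wrap pair (faster).

-- ===== PORT A =====
-- one loop iteration of A: compare s[0] with s[-1], then rotate s = s[1:] + s[0]
-- (the `| _, _ => st` branch is unreachable: inside the loop s is nonempty, Python never raises)
def pvAStep (st : Int × List Char) (_i : Int) : Int × List Char :=
  match PySem.List.pyGet? st.2 0, PySem.List.pyGet? st.2 (-1) with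
  | some a, some b =>
      ((if a = b then st.1 + 1 else st.1), PySem.List.slice st.2 (some 1) none ++ [a])
  | _, _ => st

def countSame (s : String) : Int :=
  ((PySem.List.pyRange 0 (s.toList.length : Int) 1).foldl pvAStep (0, s.toList)).1

-- ===== PORT B =====
def countSame_alt (s : String) : Int :=
  match s.toList with
  | [] => 0
  | c :: rest =>
      let l := c :: rest
      let count : Int := ((l.zip l.tail).countP (fun p => decide (p.1 = p.2)) : Nat)
      count + (if l.getLastD c = c then 1 else 0)

-- ===== PRECONDITION & SPEC =====
def Spec_countSame (s : String) (out : Int) : Prop := out = countSame_alt s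
instance (s : String) (out : Int) : Decidable (Spec_countSame s out) := by unfold Spec_countSame; infer_instance

-- ===== CLAIM (what is proved, stated in full; the proofs are below) =====
def Claim_equal_countSame : Prop := ∀ (s : String), Dom_countSame s → Spec_countSame s (countSame s)

-- ===== LEMMAS AND PROOFS =====

-- number of linearly adjacent equal pairs
def pvLin : List Char → Int
  | a :: b :: t => (if a = b then 1 else 0) + pvLin (b :: t)
  | _ => 0

-- total count A's loop still adds when `rest` remains to be rotated to the front and
-- `done` (nonempty) has already been moved to the back
def pvGain : List Char → List Char → Int
  | [], _ => 0
  | a :: r, done => (if done.getLast? = some a then 1 else 0) + pvLin (a :: r)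

lemma pvGetLast?_some (l : List Char) (h : l ≠ []) : ∃ g, l.getLast? = some g := by
  cases hg : l.getLast? with
  | none => rw [List.getLast?_eq_none_iff] at hg; contradiction
  | some g => exact ⟨g, rfl⟩

lemma pvGain_cons (a : Char) (r done : List Char) :
    pvGain (a :: r) done = (if done.getLast? = some a then 1 else 0) + pvGain r (done ++ [a]) := by
  cases r with
  | nil => simp [pvGain, pvLin]
  | cons b r' =>
      simp only [pvGain, pvLin, List.getLast?_concat]
      split_ifs with h1 h2 h3 <;> simp_all

lemma pvGain_start (x : Char) (t : List Char) : pvGain t [x] = pvLin (x :: t) := by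
  cases t with
  | nil => simp [pvGain, pvLin]
  | cons b t' =>
      simp only [pvGain, pvLin]
      have hx : ([x] : List Char).getLast? = some x := rfl
      rw [hx]
      split_ifs with h1 h2 h3 <;> simp_all

lemma pvZip_lin (l : List Char) :
    (((l.zip l.tail).countP (fun p => decide (p.1 = p.2)) : Nat) : Int) = pvLin l := by
  induction l with
  | nil => simp [pvLin]
  | cons a t ih =>
      cases t with
      | nil => simp [pvLin]
      | cons b t' =>
          simp only [List.tail_cons, List.zip_cons_cons, List.countP_cons] at *
          simp only [pvLin]
          by_cases h : a = b <;> simp [h] <;> omega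

lemma pvA_loop (rest : List Char) : ∀ (L : List Int), L.length = rest.length →
    ∀ (done : List Char), done ≠ [] → ∀ (c : Int),
    (L.foldl pvAStep (c, rest ++ done)).1 = c + pvGain rest done := by
  induction rest with
  | nil =>
      intro L hL done _ c
      have : L = [] := List.eq_nil_of_length_eq_zero hL
      simp [this, pvGain]
  | cons a r ih =>
      intro L hL done hd c
      cases L with
      | nil => simp at hL
      | cons i L' =>
          simp only [List.foldl_cons]
          have hstep : pvAStep (c, (a :: r) ++ done) i =
              ((if done.getLast? = some a then c + 1 else c), r ++ (done ++ [a])) := by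
            obtain ⟨g, hg⟩ := pvGetLast?_some done hd
            have hlast : ((a :: r) ++ done).getLast? = some g := by
              rw [List.getLast?_append_of_ne_nil (a :: r) hd, hg]
            simp only [pvAStep, PySem.List.pyGet?_neg_one, hlast,
              PySem.List.slice_from_one, hg]
            by_cases h : a = g <;> simp [h, eq_comm]
          rw [hstep]
          have hL' : L'.length = r.length := by simpa using hL
          rw [ih L' hL' (done ++ [a]) (by simp) _]
          rw [pvGain_cons]
          split_ifs <;> omega

lemma pvAlt_cons (s : String) (x : Char) (t : List Char) (h : s.toList = x :: t) :
    countSame_alt s =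
      pvLin (x :: t) + (if (x :: t).getLast? = some x then 1 else 0) := by
  unfold countSame_alt
  rw [h]
  simp only []
  rw [pvZip_lin]
  obtain ⟨g, hg⟩ := pvGetLast?_some (x :: t) (by simp)
  rw [hg, List.getLastD_eq_getLast?, hg]
  simp

lemma pvMain (s : String) : countSame s = countSame_alt s := by
  cases hl : s.toList with
  | nil =>
      unfold countSame countSame_alt
      rw [hl, PySem.List.pyRange_one_eq_nil (by simp)]
      simp
  | cons x t =>
      rw [pvAlt_cons s x t hl]
      unfold countSame
      rw [hl]
      have hN : (0 : Int) < ((x :: t).length : Int) := by simp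
      rw [PySem.List.pyRange_one_cons hN, List.foldl_cons]
      have hstep : pvAStep (0, x :: t) 0 =
          ((if (x :: t).getLast? = some x then (1 : Int) else 0), t ++ [x]) := by
        obtain ⟨g, hg⟩ := pvGetLast?_some (x :: t) (by simp)
        simp only [pvAStep, PySem.List.pyGet?_zero_cons, PySem.List.pyGet?_neg_one, hg,
          PySem.List.slice_from_one, List.tail_cons]
        by_cases h : x = g <;> simp [h, eq_comm]
      rw [hstep]
      have h01 : (0 : Int) + 1 = 1 := by norm_num
      rw [h01]
      have hlen : (PySem.List.pyRange 1 ((x :: t).length : Int) 1).length = t.length := by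
        rw [PySem.List.length_pyRange_one]; simp
      rw [pvA_loop t _ hlen [x] (by simp) _]
      rw [pvGain_start]
      split_ifs <;> omega

-- ===== VERDICT (by name: the statement is the Claim_ definition above) =====
theorem countSame_spec : Claim_equal_countSame := by
  intro s _
  unfold Spec_countSame
  exact pvMain s
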